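-- pv_equiv track=rewrite | github.com/haossr/monomarket | scripts/s10_param_grid_compare.py | _source_profile
-- ===== SOURCE A (Python) =====
-- def _source_profile(values: list[str]) -> str:
--     normalized = [v.strip() for v in values if v.strip()]
--     if not normalized:
--         return "unknown"
--     unique_values = sorted(set(normalized))
--     if len(unique_values) == 1:
--         return unique_values[0]
--     return "mixed"
-- ===== SOURCE B (Python) =====
-- def _source_profile(values: list[str]) -> str:
--     first = None
--     for v in values:
--         s = v.strip()
--         if not s:
--             continue
--         if first is None:
--             first = s
--         elif s != first:
--             return "mixed"
--     return "unknown" if first is None else first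
-- ===== Notes on version B (the rewrite author's own statement) =====
-- stated objective: simpler
-- what changed: B does one early-exit pass keeping only the first non-blank stripped string as a representative, instead of materializing a filtered list, a set and a sorted list and branching on the sorted set's length.
import Mathlib
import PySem

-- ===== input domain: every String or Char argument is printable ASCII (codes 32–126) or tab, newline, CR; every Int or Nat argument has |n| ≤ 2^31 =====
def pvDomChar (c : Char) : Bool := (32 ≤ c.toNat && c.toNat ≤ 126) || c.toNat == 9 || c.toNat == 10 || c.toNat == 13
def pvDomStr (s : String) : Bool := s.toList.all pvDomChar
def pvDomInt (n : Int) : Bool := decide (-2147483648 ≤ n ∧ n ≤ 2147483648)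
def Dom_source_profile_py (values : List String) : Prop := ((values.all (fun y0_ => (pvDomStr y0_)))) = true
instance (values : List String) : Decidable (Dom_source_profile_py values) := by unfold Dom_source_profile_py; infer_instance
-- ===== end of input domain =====

-- B keeps one representative string in a single early-exit pass instead of A's filtered list + set + sorted-set-length branch (objective: simpler).

-- ===== PORT A =====
-- [v.strip() for v in values if v.strip()]
def pyNormalized (values : List String) : List String :=
  (values.filter (fun v => !(PySem.Str.strip v == ""))).map (fun v => PySem.Str.strip v)

def source_profile_py (values : List String) : String :=
  let normalized := pyNormalized values
  if normalized = [] then "unknown"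
  else
    let unique_values := PySem.List.sorted (PySem.Set.ofList normalized) (fun x => x) false
    if unique_values.length = 1 then unique_values.headD "" else "mixed"

-- ===== PORT B =====
def srcLoop (first : Option String) (l : List String) : String :=
  match l with
  | [] => match first with | none => "unknown" | some f => f
  | v :: rest =>
    let s := PySem.Str.strip v
    if s = "" then srcLoop first rest
    else
      match first with
      | none => srcLoop (some s) rest
      | some f => if s ≠ f then "mixed" else srcLoop first rest

def source_profile_py_alt (values : List String) : String := srcLoop none values

-- ===== PRECONDITION & SPEC =====
def Spec_source_profile_py (values : List String) (out : String) : Prop := out = source_profile_py_alt values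
instance (values : List String) (out : String) : Decidable (Spec_source_profile_py values out) := by unfold Spec_source_profile_py; infer_instance

-- ===== CLAIM (what is proved, stated in full; the proofs are below) =====
def Claim_equal_source_profile_py : Prop := ∀ (values : List String), Dom_source_profile_py values → Spec_source_profile_py values (source_profile_py values)

-- ===== LEMMAS AND PROOFS =====

lemma pyNormalized_nil : pyNormalized [] = [] := rfl

lemma pyNormalized_cons (v : String) (rest : List String) :
    pyNormalized (v :: rest) =
      if PySem.Str.strip v = "" then pyNormalized rest
      else PySem.Str.strip v :: pyNormalized rest := by
  by_cases h : PySem.Str.strip v = "" <;> simp [pyNormalized, h]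

lemma ofList_all_eq {M : List String} {s : String} (h : M.all (fun x => x == s)) :
    PySem.Set.ofList (s :: M) = [s] := by
  induction M with
  | nil => rfl
  | cons x t ih =>
    simp only [List.all_cons, Bool.and_eq_true, beq_iff_eq] at h
    obtain ⟨hx, ht⟩ := h
    subst hx
    have h2 : PySem.Set.ofList (x :: x :: t) = PySem.Set.ofList (x :: t) := by
      simp [PySem.Set.ofList]
    rw [h2, ih (by simpa using ht)]

lemma two_le_ofList {M : List String} {s : String} (h : ¬ M.all (fun x => x == s)) :
    2 ≤ (PySem.Set.ofList (s :: M)).length := by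
  simp only [List.all_eq_true, beq_iff_eq, not_forall] at h
  obtain ⟨x, hxM, hxs⟩ := h
  have hs : s ∈ PySem.Set.ofList (s :: M) := by
    rw [PySem.Set.mem_ofList]; exact List.mem_cons_self ..
  have hx : x ∈ PySem.Set.ofList (s :: M) := by
    rw [PySem.Set.mem_ofList]; exact List.mem_cons_of_mem _ hxM
  match hL : PySem.Set.ofList (s :: M) with
  | [] => rw [hL] at hs; simp at hs
  | [a] =>
    rw [hL] at hs hx
    simp only [List.mem_singleton] at hs hx
    exact absurd (hx.trans hs.symm) (by simpa using hxs)
  | a :: b :: t => simp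

lemma srcLoop_some (l : List String) (f : String) :
    srcLoop (some f) l = if (pyNormalized l).all (fun x => x == f) then f else "mixed" := by
  induction l with
  | nil => simp [srcLoop, pyNormalized_nil]
  | cons v rest ih =>
    rw [srcLoop, pyNormalized_cons]
    by_cases h : PySem.Str.strip v = ""
    · simp [h, ih]
    · simp only [if_neg h]
      by_cases he : PySem.Str.strip v = f
      · simp [he, ih]
      · simp [he]

lemma sorted_singleton (s : String) :
    PySem.List.sorted [s] (fun x => x) false = [s] := by
  apply PySem.List.sorted_eq_self_of_pairwise
  simp

lemma main_lemma (values : List String) : source_profile_py values = srcLoop none values := by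
  induction values with
  | nil => rfl
  | cons v rest ih =>
    rw [source_profile_py, srcLoop]
    by_cases h : PySem.Str.strip v = ""
    · simp only [pyNormalized_cons, if_pos h]
      exact ih
    · simp only [pyNormalized_cons, if_neg h]
      rw [srcLoop_some]
      have hne : PySem.Str.strip v :: pyNormalized rest ≠ [] := by simp
      rw [if_neg hne]
      by_cases ha : (pyNormalized rest).all (fun x => x == PySem.Str.strip v)
      · rw [if_pos ha, ofList_all_eq ha, sorted_singleton]
        simp
      · rw [if_neg ha]
        have h2 := two_le_ofList ha
        have hlen : (PySem.List.sorted (PySem.Set.ofList (PySem.Str.strip v :: pyNormalized rest)) (fun x => x) false).length ≠ 1 := by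
          rw [PySem.List.length_sorted]; omega
        rw [if_neg hlen]

-- ===== VERDICT (by name: the statement is the Claim_ definition above) =====
theorem source_profile_py_spec : Claim_equal_source_profile_py := by
  intro values _
  exact main_lemma values
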